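-- pv_equiv track=rewrite | github.com/enigmaTeam666/IEEEXtreme_Solutions | Xtreme9.0 - Car Spark.py | bigger_next
-- ===== SOURCE A (Python) =====
-- def bigger_next(value,bookings):
--     for i in range(value+1,max(bookings)+1):
--         try :
--             tmp = bookings[i]
--             return i
--         except :
--             pass
--     return -1
-- ===== SOURCE B (Python) =====
-- def bigger_next(value, bookings):
--     return min((k for k in bookings if k > value), default=-1)
-- ===== Notes on version B (the rewrite author's own statement) =====
-- stated objective: simpler
-- what changed: Instead of probing every integer from value+1 up to max(bookings) for dict membership, B takes the minimum of the keys greater than value in a single comprehension over the keys.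
import Mathlib
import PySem

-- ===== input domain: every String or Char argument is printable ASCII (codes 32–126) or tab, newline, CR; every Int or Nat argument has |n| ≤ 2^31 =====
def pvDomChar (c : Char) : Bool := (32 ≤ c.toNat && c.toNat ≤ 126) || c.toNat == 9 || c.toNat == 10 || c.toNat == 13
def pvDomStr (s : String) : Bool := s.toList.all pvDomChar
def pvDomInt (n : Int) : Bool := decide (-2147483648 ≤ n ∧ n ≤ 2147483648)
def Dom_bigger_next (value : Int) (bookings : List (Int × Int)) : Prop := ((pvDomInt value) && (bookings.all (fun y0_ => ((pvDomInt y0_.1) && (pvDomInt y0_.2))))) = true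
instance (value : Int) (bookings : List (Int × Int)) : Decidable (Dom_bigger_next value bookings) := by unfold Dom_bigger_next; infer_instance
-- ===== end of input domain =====

-- B replaces A's upward membership probe (value+1 … max key) by one minimum over the keys > value: simpler, one line.

-- ===== PORT A =====
-- the for-loop over range(value+1, max(bookings)+1): return the first i that is a dict key, else -1
def bigger_nextLoop (bookings : List (Int × Int)) : List Int → Int
  | [] => -1
  | i :: rest => if bookings.any (fun p => p.1 == i) then i else bigger_nextLoop bookings rest

def bigger_next (value : Int) (bookings : List (Int × Int)) : Int :=
  match bookings.map Prod.fst with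
  | [] => -1  -- unreachable under Pre_: Python's max([]) raises ValueError here
  | k :: t =>
    bigger_nextLoop bookings (PySem.List.pyRange (value + 1) (t.foldl max k + 1) 1)

-- ===== PORT B =====
def bigger_next_alt (value : Int) (bookings : List (Int × Int)) : Int :=
  match PySem.List.min? ((bookings.map Prod.fst).filter (fun k => decide (value < k))) (fun x => x) with
  | some m => m
  | none => -1

-- ===== PRECONDITION & SPEC =====
-- A raises ValueError (max() of an empty sequence) on an empty dict; Pre_ excludes exactly that input (B would return -1 there).
def Pre_bigger_next (value : Int) (bookings : List (Int × Int)) : Prop := bookings ≠ []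
instance (value : Int) (bookings : List (Int × Int)) : Decidable (Pre_bigger_next value bookings) := by unfold Pre_bigger_next; infer_instance
def pvWitness_bigger_next : Int × (List (Int × Int)) := (2, [(1, 5), (4, 6), (7, 0)])

def Spec_bigger_next (value : Int) (bookings : List (Int × Int)) (out : Int) : Prop := out = bigger_next_alt value bookings
instance (value : Int) (bookings : List (Int × Int)) (out : Int) : Decidable (Spec_bigger_next value bookings out) := by unfold Spec_bigger_next; infer_instance

-- ===== CLAIM (what is proved, stated in full; the proofs are below) =====
def Claim_equal_bigger_next : Prop := ∀ (value : Int) (bookings : List (Int × Int)), Dom_bigger_next value bookings → Pre_bigger_next value bookings → Spec_bigger_next value bookings (bigger_next value bookings)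

-- ===== LEMMAS AND PROOFS =====

-- If no element of the scanned list is a key, the loop returns -1.
lemma loop_none (bookings : List (Int × Int)) (r : List Int)
    (h : ∀ i ∈ r, bookings.any (fun p => p.1 == i) = false) :
    bigger_nextLoop bookings r = -1 := by
  induction r with
  | nil => rfl
  | cons i rest ih =>
    simp only [bigger_nextLoop, h i (by simp)]
    exact ih (fun j hj => h j (by simp [hj]))

-- Scanning an increasing range returns the least key in it.
lemma loop_min (bookings : List (Int × Int)) (m : Int)
    (hm : bookings.any (fun p => p.1 == m) = true) :
    ∀ (a b : Int), a ≤ m → m < b →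
    (∀ k ∈ bookings.map Prod.fst, a ≤ k → m ≤ k) →
    bigger_nextLoop bookings (PySem.List.pyRange a b 1) = m := by
  intro a b ha hb hmin
  have hlt : a < b := lt_of_le_of_lt ha hb
  obtain ⟨n, hn⟩ : ∃ n : Nat, (b - a).toNat = n := ⟨_, rfl⟩
  induction n generalizing a with
  | zero => omega
  | succ n ih =>
    rw [PySem.List.pyRange_one_cons hlt]
    by_cases hk : bookings.any (fun p => p.1 == a) = true
    · simp only [bigger_nextLoop, hk, if_true]
      have : a ∈ bookings.map Prod.fst := by
        simp only [List.any_eq_true, beq_iff_eq] at hk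
        obtain ⟨p, hp, hpe⟩ := hk
        exact List.mem_map.mpr ⟨p, hp, hpe⟩
      have := hmin a this le_rfl
      omega
    · simp only [bigger_nextLoop, hk]
      have hma : m ≠ a := by
        intro h; subst h; exact hk hm
      have ha1 : a + 1 ≤ m := by omega
      by_cases h2 : a + 1 < b
      · exact ih (a + 1) ha1 (fun k hk' hak => hmin k hk' (by omega)) h2 (by omega)
      · omega

lemma mem_any (bookings : List (Int × Int)) (m : Int) (h : m ∈ bookings.map Prod.fst) :
    bookings.any (fun p => p.1 == m) = true := by
  simp only [List.any_eq_true, beq_iff_eq]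
  obtain ⟨p, hp, hpe⟩ := List.mem_map.mp h
  exact ⟨p, hp, hpe⟩

-- ===== VERDICT (by name: the statement is the Claim_ definition above) =====
theorem bigger_next_spec : Claim_equal_bigger_next := by
  intro value bookings _ hpre
  unfold Spec_bigger_next bigger_next bigger_next_alt
  obtain ⟨k, t, hkt⟩ : ∃ k t, bookings.map Prod.fst = k :: t := by
    cases hb : bookings with
    | nil => exact absurd hb hpre
    | cons p ps => exact ⟨p.1, ps.map Prod.fst, by simp⟩
  have hmax : ∀ x ∈ bookings.map Prod.fst, x ≤ t.foldl max k := by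
    intro x hx
    rw [hkt] at hx
    rcases List.mem_cons.mp hx with h | h
    · subst h; exact (PySem.List.le_foldl_max t x).1
    · exact (PySem.List.le_foldl_max t k).2 x h
  rw [hkt]
  cases hmin : PySem.List.min? ((k :: t).filter (fun k => decide (value < k))) (fun x => x) with
  | none =>
    have hfil : (k :: t).filter (fun k => decide (value < k)) = [] :=
      (PySem.List.min?_eq_none_iff _ _).mp hmin
    simp only
    apply loop_none
    intro i hi
    rw [PySem.List.mem_pyRange_one] at hi
    by_contra hany
    simp only [Bool.not_eq_false] at hany
    have : i ∈ (k :: t).filter (fun x => decide (value < x)) := by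
      simp only [List.any_eq_true, beq_iff_eq] at hany
      obtain ⟨p, hp, hpe⟩ := hany
      refine List.mem_filter.mpr ⟨?_, by simp; omega⟩
      rw [← hkt]
      exact List.mem_map.mpr ⟨p, hp, hpe⟩
    rw [hfil] at this
    exact absurd this (List.not_mem_nil)
  | some m =>
    have hmem := PySem.List.min?_mem hmin
    have hlow := PySem.List.min?_isMin hmin
    have hmk : m ∈ bookings.map Prod.fst := by
      rw [hkt]; exact (List.mem_filter.mp hmem).1
    have hvm : value < m := by
      have := (List.mem_filter.mp hmem).2
      simpa using this
    simp only
    apply loop_min bookings m (mem_any _ _ hmk)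
    · omega
    · have := hmax m hmk; omega
    · intro x hx hax
      by_cases hvx : value < x
      · refine hlow x ?_
        refine List.mem_filter.mpr ⟨?_, by simpa⟩
        rw [← hkt]; exact hx
      · omega
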